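-- pv_equiv track=rewrite | github.com/Firefly0237/gamedev | scanner/unity_scanner.py | _build_namespace_to_classes
-- ===== SOURCE A (Python) =====
-- def _build_namespace_to_classes(scripts: list[dict]) -> dict[str, list[str]]:
--     namespace_to_classes: dict[str, list[str]] = {}
--     for script in scripts:
--         namespace = script.get("namespace", "")
--         class_name = script.get("class_name", "")
--         if not namespace or not class_name:
--             continue
--         namespace_to_classes.setdefault(namespace, [])
--         if class_name not in namespace_to_classes[namespace]:
--             namespace_to_classes[namespace].append(class_name)
--     return namespace_to_classes
-- ===== SOURCE B (Python) =====
-- def _build_namespace_to_classes(scripts: list[dict]) -> dict[str, list[str]]: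
--     # Pass 1: flatten to a list of (namespace, class_name) pairs, skipping invalid entries.
--     pairs = []
--     for script in scripts:
--         namespace = script.get("namespace", "")
--         class_name = script.get("class_name", "")
--         if namespace and class_name:
--             pairs.append((namespace, class_name))
--     # Pass 2: group-by — distinct namespaces in first-occurrence order, each mapped to
--     # the ordered-distinct class names selected from the flat pair list.
--     result = {}
--     for ns in dict.fromkeys(n for n, _ in pairs):
--         result[ns] = list(dict.fromkeys(c for n, c in pairs if n == ns))
--     return result
-- ===== Notes on version B (the rewrite author's own statement) =====
-- stated objective: alternative
-- what changed: A interleaves dict mutation (setdefault + per-element membership check and append) in one pass; B first flattens scripts to a plain list of (namespace, class_name) pairs, then builds the result as a group-by: distinct namespaces in first-occurrence order, each mapped to the ordered-deduplicated class names selected from the flat pair list.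
import Mathlib
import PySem

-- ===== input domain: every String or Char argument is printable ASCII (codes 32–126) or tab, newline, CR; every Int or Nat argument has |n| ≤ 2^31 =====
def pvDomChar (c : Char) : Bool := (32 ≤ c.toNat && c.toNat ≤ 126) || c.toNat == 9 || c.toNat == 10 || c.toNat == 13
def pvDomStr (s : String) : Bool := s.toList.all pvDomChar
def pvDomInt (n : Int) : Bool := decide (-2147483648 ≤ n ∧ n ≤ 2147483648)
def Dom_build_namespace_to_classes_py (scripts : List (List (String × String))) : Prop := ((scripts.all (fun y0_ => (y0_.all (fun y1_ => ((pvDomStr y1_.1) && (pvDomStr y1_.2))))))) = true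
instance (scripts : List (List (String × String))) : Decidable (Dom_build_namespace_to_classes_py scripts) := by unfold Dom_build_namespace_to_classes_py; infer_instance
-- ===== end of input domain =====

-- B replaces A's interleaved dict-mutation loop (setdefault + membership check + append) by a
-- flatten-then-group-by: extract the valid (namespace, class_name) pairs, then map each distinct
-- namespace to its ordered-deduplicated class names (alternative decomposition, same cost).


-- ===== PORT A =====
-- per-script step: extract namespace/class_name, skip if either empty, setdefault,
-- then append only if the class name is not already present
def pvStepA (d : PySem.Dict String (List String)) (script : List (String × String)) :
    PySem.Dict String (List String) :=
  let ns := (List.lookup "namespace" script).getD ""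
  let cn := (List.lookup "class_name" script).getD ""
  if ns = "" || cn = "" then d
  else
    let d' := PySem.Dict.setdefault d ns []
    if cn ∈ d'.getD ns [] then d'
    else d'.modify ns [] (fun v => v ++ [cn])

def build_namespace_to_classes_py (scripts : List (List (String × String))) :
    List (String × List String) :=
  (scripts.foldl pvStepA PySem.Dict.empty).items

-- ===== PORT B =====
-- pass 1: flatten to the list of valid (namespace, class_name) pairs, in order
def pvPairs (scripts : List (List (String × String))) : List (String × String) :=
  scripts.foldl (fun acc script =>
    let ns := (List.lookup "namespace" script).getD ""
    let cn := (List.lookup "class_name" script).getD ""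
    if ns ≠ "" ∧ cn ≠ "" then acc ++ [(ns, cn)] else acc) []

-- pass 2: group-by over the flat pair list — distinct namespaces in first-occurrence order,
-- each mapped to the ordered-distinct class names filtered from the pair list
def build_namespace_to_classes_py_alt (scripts : List (List (String × String))) :
    List (String × List String) :=
  let pairs := pvPairs scripts
  (PySem.List.dedup (pairs.map Prod.fst)).map
    (fun ns => (ns, PySem.List.dedup ((pairs.filter (fun p => p.1 == ns)).map Prod.snd)))

-- ===== PRECONDITION & SPEC =====
def Spec_build_namespace_to_classes_py (scripts : List (List (String × String))) (out : List (String × List String)) : Prop := out = build_namespace_to_classes_py_alt scripts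
instance (scripts : List (List (String × String))) (out : List (String × List String)) : Decidable (Spec_build_namespace_to_classes_py scripts out) := by unfold Spec_build_namespace_to_classes_py; infer_instance

-- ===== CLAIM (what is proved, stated in full; the proofs are below) =====
def Claim_equal_build_namespace_to_classes_py : Prop := ∀ (scripts : List (List (String × String))), Dom_build_namespace_to_classes_py scripts → Spec_build_namespace_to_classes_py scripts (build_namespace_to_classes_py scripts)

-- ===== LEMMAS AND PROOFS =====

-- A's per-pair step, with the extraction and validity guard already done
def pvStepP (d : PySem.Dict String (List String)) (p : String × String) :
    PySem.Dict String (List String) :=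
  let d' := PySem.Dict.setdefault d p.1 []
  if p.2 ∈ d'.getD p.1 [] then d'
  else d'.modify p.1 [] (fun v => v ++ [p.2])

-- extraction of the valid pair(s) of one script (0 or 1 of them)
def pvExt (script : List (String × String)) : List (String × String) :=
  let ns := (List.lookup "namespace" script).getD ""
  let cn := (List.lookup "class_name" script).getD ""
  if ns = "" ∨ cn = "" then [] else [(ns, cn)]

-- B's group-by as a function of the flat pair list, and its two components
def pvNss (pre : List (String × String)) : List String :=
  PySem.List.dedup (pre.map Prod.fst)

def pvF (pre : List (String × String)) (k : String) : List String :=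
  PySem.List.dedup ((pre.filter (fun q => q.1 == k)).map Prod.snd)

def pvGroups (pre : List (String × String)) : List (String × List String) :=
  (pvNss pre).map (fun k => (k, pvF pre k))

theorem pvPairs_eq_flatMap (scripts : List (List (String × String))) :
    pvPairs scripts = scripts.flatMap pvExt := by
  unfold pvPairs
  rw [show (fun (acc : List (String × String)) script =>
        let ns := (List.lookup "namespace" script).getD ""
        let cn := (List.lookup "class_name" script).getD ""
        if ns ≠ "" ∧ cn ≠ "" then acc ++ [(ns, cn)] else acc)
      = (fun acc script => acc ++ pvExt script) from ?_]
  · exact PySem.List.foldl_append_eq_flatMap pvExt scripts []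
  · funext acc script
    simp only [pvExt]
    by_cases h1 : (List.lookup "namespace" script).getD "" = "" <;>
      by_cases h2 : (List.lookup "class_name" script).getD "" = "" <;>
      simp [h1, h2]

theorem pvFoldA_eq_foldP (scripts : List (List (String × String)))
    (d : PySem.Dict String (List String)) :
    scripts.foldl pvStepA d = (scripts.flatMap pvExt).foldl pvStepP d := by
  induction scripts generalizing d with
  | nil => rfl
  | cons s rest ih =>
      simp only [List.foldl_cons, List.flatMap_cons, List.foldl_append]
      rw [show pvStepA d s = (pvExt s).foldl pvStepP d from ?_]
      · exact ih _
      · simp only [pvStepA, pvExt]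
        by_cases h1 : (List.lookup "namespace" s).getD "" = "" <;>
          by_cases h2 : (List.lookup "class_name" s).getD "" = "" <;>
          simp [h1, h2, pvStepP]

-- lookup in the dict whose items are a map over a Nodup key list
theorem pvGet?_mk_map (l : List String) (f : String → List String) (hnd : l.Nodup)
    (x : String) :
    (PySem.Dict.mk (l.map (fun k => (k, f k)))).get? x
      = if x ∈ l then some (f x) else none := by
  induction l with
  | nil => simp [PySem.Dict.get?]
  | cons a rest ih =>
      simp only [List.map_cons, PySem.Dict.get?_mk_cons]
      rcases List.nodup_cons.mp hnd with ⟨ha, hrest⟩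
      by_cases hx : a = x
      · subst hx; simp [ha]
      · have hb : (a == x) = false := by simp [hx]
        rw [hb]
        simp only [Bool.false_eq_true, if_false, ih hrest]
        by_cases hm : x ∈ rest <;> simp [hm, Ne.symm hx]

theorem pvNss_nodup (pre : List (String × String)) : (pvNss pre).Nodup := by
  simp only [pvNss, PySem.List.dedup_eq_ofList]
  exact PySem.Set.nodup_ofList _

theorem mem_pvNss (pre : List (String × String)) (k : String) :
    k ∈ pvNss pre ↔ k ∈ pre.map Prod.fst := by
  simp [pvNss, PySem.List.dedup_eq_ofList, PySem.Set.mem_ofList]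

theorem pvNss_append (pre : List (String × String)) (ns cn : String) :
    pvNss (pre ++ [(ns, cn)]) = PySem.Set.add (pvNss pre) ns := by
  unfold pvNss
  have h : (pre ++ [(ns, cn)]).map Prod.fst = pre.map Prod.fst ++ [ns] := by simp
  rw [h, PySem.List.dedup_eq_ofList, PySem.List.dedup_eq_ofList,
    PySem.Set.ofList_append_singleton]

theorem pvFilter_append_self (pre : List (String × String)) (ns cn : String) :
    (pre ++ [(ns, cn)]).filter (fun q => q.1 == ns)
      = pre.filter (fun q => q.1 == ns) ++ [(ns, cn)] := by
  rw [List.filter_append]; simp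

theorem pvFilter_append_ne (pre : List (String × String)) (ns cn k : String)
    (h : ns ≠ k) :
    (pre ++ [(ns, cn)]).filter (fun q => q.1 == k)
      = pre.filter (fun q => q.1 == k) := by
  rw [List.filter_append]
  have hb : (ns == k) = false := by simp [h]
  simp [List.filter, hb]

theorem pvF_append_self (pre : List (String × String)) (ns cn : String) :
    pvF (pre ++ [(ns, cn)]) ns = PySem.Set.add (pvF pre ns) cn := by
  unfold pvF
  rw [pvFilter_append_self]
  have h : ((pre.filter (fun q => q.1 == ns)) ++ [(ns, cn)]).map Prod.snd
      = (pre.filter (fun q => q.1 == ns)).map Prod.snd ++ [cn] := by simp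
  rw [h, PySem.List.dedup_eq_ofList, PySem.List.dedup_eq_ofList,
    PySem.Set.ofList_append_singleton]

theorem pvF_append_ne (pre : List (String × String)) (ns cn k : String) (h : ns ≠ k) :
    pvF (pre ++ [(ns, cn)]) k = pvF pre k := by
  simp only [pvF, pvFilter_append_ne pre ns cn k h]

theorem pvF_fresh (pre : List (String × String)) (ns : String)
    (h : ns ∉ pre.map Prod.fst) : pvF pre ns = [] := by
  have hfil : pre.filter (fun q => q.1 == ns) = [] := by
    rw [List.filter_eq_nil_iff]
    intro q hq hq1
    have : q.1 = ns := by simpa using hq1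
    exact h (this ▸ List.mem_map_of_mem (f := Prod.fst) hq)
  simp [pvF, hfil, PySem.List.dedup_eq_ofList, PySem.Set.ofList]

-- the invariant: A's fold over the flat pair list IS B's group-by
theorem pvFoldP_eq_groups (pairs : List (String × String)) :
    pairs.foldl pvStepP PySem.Dict.empty = PySem.Dict.mk (pvGroups pairs) := by
  induction pairs using List.reverseRecOn with
  | nil => rfl
  | append_singleton pre p ih =>
      obtain ⟨ns, cn⟩ := p
      rw [List.foldl_append, List.foldl_cons, List.foldl_nil, ih]
      have hnd : (pvNss pre).Nodup := pvNss_nodup pre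
      have hget : ∀ x, (PySem.Dict.mk (pvGroups pre)).get? x
          = if x ∈ pvNss pre then some (pvF pre x) else none := by
        intro x; exact pvGet?_mk_map (pvNss pre) (pvF pre) hnd x
      have hkeys : (PySem.Dict.mk (pvGroups pre)).keys = pvNss pre := by
        simp [PySem.Dict.keys, pvGroups, Function.comp_def]
      have hcont : (PySem.Dict.mk (pvGroups pre)).contains ns
          = decide (ns ∈ pvNss pre) := by
        rw [PySem.Dict.contains_eq_decide_mem_keys, hkeys]
      by_cases hmem : ns ∈ pvNss pre
      · -- namespace already grouped
        have hsd : (PySem.Dict.mk (pvGroups pre)).setdefault ns []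
            = PySem.Dict.mk (pvGroups pre) :=
          PySem.Dict.setdefault_of_contains _ _ (by simp [hcont, hmem])
        have hgD : (PySem.Dict.mk (pvGroups pre)).getD ns [] = pvF pre ns := by
          rw [PySem.Dict.getD_eq_get?_getD, hget]; simp [hmem]
        have hnss' : pvNss (pre ++ [(ns, cn)]) = pvNss pre := by
          rw [pvNss_append]; exact PySem.Set.add_of_mem hmem
        by_cases hcn : cn ∈ pvF pre ns
        · -- duplicate class: A leaves the dict unchanged, and B's groups are unchanged
          simp only [pvStepP, hsd, hgD, if_pos hcn]
          apply PySem.Dict.ext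
          show pvGroups pre = (PySem.Dict.mk (pvGroups (pre ++ [(ns, cn)]))).items
          simp only [pvGroups, hnss']
          apply List.map_congr_left
          intro k hk
          by_cases hkns : ns = k
          · subst hkns
            rw [pvF_append_self, PySem.Set.add_of_mem hcn]
          · rw [pvF_append_ne pre ns cn k hkns]
        · -- new class in an existing namespace: append it to that group
          have hmod : (PySem.Dict.mk (pvGroups pre)).modify ns [] (fun v => v ++ [cn])
              = (PySem.Dict.mk (pvGroups pre)).insert ns (pvF pre ns ++ [cn]) := by
            show (PySem.Dict.mk (pvGroups pre)).insert ns
                ((PySem.Dict.mk (pvGroups pre)).getD ns [] ++ [cn]) = _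
            rw [hgD]
          simp only [pvStepP, hsd, hgD, if_neg hcn, hmod]
          apply PySem.Dict.ext
          rw [PySem.Dict.items_insert_of_contains _ _ (by simp [hcont, hmem])]
          show (pvGroups pre).map _ = pvGroups (pre ++ [(ns, cn)])
          simp only [pvGroups, hnss', List.map_map]
          apply List.map_congr_left
          intro k hk
          by_cases hkns : k = ns
          · subst hkns
            simp only [Function.comp_apply, beq_self_eq_true, if_pos]
            rw [pvF_append_self, PySem.Set.add_of_not_mem hcn]
          · have hb : (k == ns) = false := by simp [hkns]
            simp only [Function.comp_apply, hb, Bool.false_eq_true, if_false]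
            rw [pvF_append_ne pre ns cn k (Ne.symm hkns)]
      · -- fresh namespace: setdefault inserts [], then the class is appended
        have hnotin : ns ∉ pre.map Prod.fst := fun hc => hmem ((mem_pvNss pre ns).mpr hc)
        have hcontf : (PySem.Dict.mk (pvGroups pre)).contains ns = false := by
          simp [hcont, hmem]
        have hsd : (PySem.Dict.mk (pvGroups pre)).setdefault ns []
            = (PySem.Dict.mk (pvGroups pre)).insert ns [] :=
          PySem.Dict.setdefault_of_not_contains _ _ hcontf
        have hg0 : ((PySem.Dict.mk (pvGroups pre)).insert ns []).getD ns []
            = ([] : List String) := PySem.Dict.getD_insert_self _ _ _ _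
        simp only [pvStepP, hsd, hg0, List.not_mem_nil, if_false]
        have hmod : ((PySem.Dict.mk (pvGroups pre)).insert ns []).modify ns []
              (fun v => v ++ [cn])
            = ((PySem.Dict.mk (pvGroups pre)).insert ns []).insert ns ([] ++ [cn]) := by
          show ((PySem.Dict.mk (pvGroups pre)).insert ns []).insert ns
              (((PySem.Dict.mk (pvGroups pre)).insert ns []).getD ns [] ++ [cn]) = _
          rw [hg0]
        rw [hmod, PySem.Dict.insert_insert_self]
        apply PySem.Dict.ext
        rw [PySem.Dict.items_insert_of_not_contains _ _ hcontf]
        show pvGroups pre ++ [(ns, [] ++ [cn])] = pvGroups (pre ++ [(ns, cn)])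
        have hnss' : pvNss (pre ++ [(ns, cn)]) = pvNss pre ++ [ns] := by
          rw [pvNss_append]; exact PySem.Set.add_of_not_mem hmem
        simp only [pvGroups, hnss', List.map_append, List.map_cons, List.map_nil]
        congr 1
        · apply List.map_congr_left
          intro k hk
          have hkns : ns ≠ k := fun h => hmem (h ▸ hk)
          rw [pvF_append_ne pre ns cn k hkns]
        · -- the fresh namespace's group is just [cn]
          rw [pvF_append_self, pvF_fresh pre ns hnotin]
          rfl

-- ===== VERDICT (by name: the statement is the Claim_ definition above) =====
theorem build_namespace_to_classes_py_spec : Claim_equal_build_namespace_to_classes_py := by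
  intro scripts _
  unfold Spec_build_namespace_to_classes_py build_namespace_to_classes_py
    build_namespace_to_classes_py_alt
  rw [pvFoldA_eq_foldP, ← pvPairs_eq_flatMap, pvFoldP_eq_groups]
  rfl
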